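-- pv_equiv track=rewrite | github.com/decordoba/mixed-algorithms | compareStringLists_Google.py | solution
-- ===== SOURCE A (Python) =====
-- def calculateValue(s):
--     # s: string without spaces
--     smallest = None
--     num = 0
--     for c in s:
--         if smallest is None or c < smallest:
--             smallest = c
--             num = 1
--         elif c == smallest:
--             num += 1
--     return num
--
-- def calculateString(A):
--     # A: string of words
--     Alist = A.split()
--     values = []
--     for a in Alist:
--         values.append(calculateValue(a))
--     return values
--
-- def solution(A, B):
--     valuesA = calculateString(A)
--     valuesB = calculateString(B)
--
--     result = []
--     for b in valuesB:
--         num = 0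
--         for a in valuesA:
--             if a < b:
--                 num += 1
--         result.append(num)
--
--     return result
-- ===== SOURCE B (Python) =====
-- def solution(A, B):
--     # Sort A's word-values once, then binary-search each B-value: O((n+m) log n)
--     # instead of A's nested O(n*m) scan.
--     def value(w):
--         return w.count(min(w))
--
--     def bisect_left(xs, b):
--         lo, hi = 0, len(xs)
--         while lo < hi:
--             mid = (lo + hi) // 2
--             if xs[mid] < b:
--                 lo = mid + 1
--             else:
--                 hi = mid
--         return lo
--
--     sA = sorted(value(w) for w in A.split())
--     return [bisect_left(sA, value(w)) for w in B.split()]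
-- ===== Notes on version B (the rewrite author's own statement) =====
-- stated objective: faster
-- what changed: Instead of scanning all of A's word-values for every word of B, B computes A's values once, sorts them, and answers each B-value with a hand-written bisect_left binary search.
import Mathlib
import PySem

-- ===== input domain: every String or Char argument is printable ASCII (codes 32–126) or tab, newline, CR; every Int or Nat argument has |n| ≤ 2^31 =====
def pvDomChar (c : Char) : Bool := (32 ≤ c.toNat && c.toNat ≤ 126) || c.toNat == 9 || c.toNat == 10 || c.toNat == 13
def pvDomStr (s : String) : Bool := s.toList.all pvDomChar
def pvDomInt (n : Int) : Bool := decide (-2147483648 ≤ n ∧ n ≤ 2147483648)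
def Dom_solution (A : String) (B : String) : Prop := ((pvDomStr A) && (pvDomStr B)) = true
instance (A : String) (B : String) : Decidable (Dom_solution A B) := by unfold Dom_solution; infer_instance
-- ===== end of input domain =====

-- B sorts A's word-values once and binary-searches each B-value instead of A's
-- nested scan over all pairs; same return value on every input.


-- ===== PORT A =====
def calculateValue (s : List Char) : Int :=
  (s.foldl
    (fun (st : Option Char × Int) c =>
      match st with
      | (none, _) => (some c, 1)
      | (some sm, num) =>
        if c < sm then (some c, 1)
        else if c = sm then (some sm, num + 1)
        else (some sm, num))
    (none, 0)).2

def calculateString (A : String) : List Int :=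
  (PySem.Chars.split₀ A.toList).foldl (fun values a => values ++ [calculateValue a]) []

def solution (A : String) (B : String) : List Int :=
  let valuesA := calculateString A
  let valuesB := calculateString B
  valuesB.foldl
    (fun result b =>
      result ++ [valuesA.foldl (fun num a => if a < b then num + 1 else num) 0])
    []

-- ===== PORT B =====
-- value(w): Python's min(w) raises on the empty word, but split() never yields one,
-- so the `none` branch (0) is unreachable on the function's inputs.
def wordValue (w : List Char) : Int :=
  match PySem.List.min? w (fun c => c) with
  | some m => ((PySem.Chars.count w [m] : Nat) : Int)   -- w.count(min(w))
  | none => 0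

-- hand-written bisect_left of Source B, step for step (lo/hi halving loop)
def bisectLeftLoop (xs : List Int) (b : Int) (lo hi : Nat) : Nat :=
  if lo < hi then
    let mid := (lo + hi) / 2
    if xs.getD mid 0 < b then bisectLeftLoop xs b (mid + 1) hi
    else bisectLeftLoop xs b lo mid
  else lo
termination_by hi - lo
decreasing_by all_goals omega

def solution_alt (A : String) (B : String) : List Int :=
  let sA := PySem.List.sorted ((PySem.Chars.split₀ A.toList).map wordValue) (fun v => v) false
  (PySem.Chars.split₀ B.toList).map (fun w => (bisectLeftLoop sA (wordValue w) 0 sA.length : Int))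

-- ===== PRECONDITION & SPEC =====
def Spec_solution (A : String) (B : String) (out : List Int) : Prop := out = solution_alt A B
instance (A : String) (B : String) (out : List Int) : Decidable (Spec_solution A B out) := by unfold Spec_solution; infer_instance

-- ===== CLAIM =====
def Claim_equal_solution : Prop := ∀ (A : String) (B : String), Dom_solution A B → Spec_solution A B (solution A B)

-- ===== LEMMAS AND PROOFS =====

-- A's scanning min/count loop, started after the first character: it computes the
-- running minimum and the count of that minimum (restarted at each new minimum).
lemma calcFold_some (t : List Char) (m : Char) (k : Int) :
    t.foldl
      (fun (st : Option Char × Int) c =>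
        match st with
        | (none, _) => (some c, 1)
        | (some sm, num) =>
          if c < sm then (some c, 1)
          else if c = sm then (some sm, num + 1)
          else (some sm, num))
      (some m, k)
    = (some (t.foldl min m),
       if t.foldl min m < m then ((t.count (t.foldl min m) : Nat) : Int)
       else k + ((t.count m : Nat) : Int)) := by
  induction t generalizing m k with
  | nil => simp
  | cons c r ih =>
    simp only [List.foldl_cons]
    by_cases h1 : c < m
    · rw [if_pos h1, ih]
      have hmc : min m c = c := min_eq_right h1.le
      rw [hmc]
      have hle : r.foldl min c ≤ c := (PySem.List.foldl_min_le r c).1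
      by_cases h2 : r.foldl min c < c
      · rw [if_pos h2, if_pos (h2.trans h1)]
        have : r.foldl min c ≠ c := ne_of_lt h2
        rw [List.count_cons]
        simp [Ne.symm this]
      · have heq : r.foldl min c = c := le_antisymm hle (not_lt.mp h2)
        rw [if_neg h2, heq, if_pos h1, List.count_cons_self]
        simp only [Prod.mk.injEq, true_and]; push_cast; ring
    · rw [if_neg h1]
      by_cases h2 : c = m
      · subst h2
        rw [if_pos rfl, ih]
        have hmc : min c c = c := min_self c
        rw [hmc]
        have hle : r.foldl min c ≤ c := (PySem.List.foldl_min_le r c).1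
        by_cases h3 : r.foldl min c < c
        · rw [if_pos h3, if_pos h3]
          have : r.foldl min c ≠ c := ne_of_lt h3
          rw [List.count_cons]
          simp [Ne.symm this]
        · rw [if_neg h3, if_neg h3, List.count_cons_self]
          simp only [Prod.mk.injEq, true_and]; push_cast; ring
      · rw [if_neg h2, ih]
        have hmc : min m c = m := min_eq_left (not_lt.mp h1)
        rw [hmc]
        have hle : r.foldl min m ≤ m := (PySem.List.foldl_min_le r m).1
        by_cases h3 : r.foldl min m < m
        · rw [if_pos h3, if_pos h3]
          have : r.foldl min m ≠ c := by
            intro he; exact absurd (he ▸ h3) (by simpa using fun hx => h1 hx)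
          rw [List.count_cons]
          simp [Ne.symm this]
        · rw [if_neg h3, if_neg h3, List.count_cons]
          have : m ≠ c := fun he => h2 he.symm
          simp [Ne.symm this]

-- str.count of a single character is the element count.
lemma countGo_singleton (m : Char) (fuel : Nat) (l : List Char) (acc : Nat)
    (h : l.length ≤ fuel) :
    PySem.Chars.count.go [m] fuel l acc = acc + l.count m := by
  induction fuel generalizing l acc with
  | zero =>
    have : l = [] := List.eq_nil_of_length_eq_zero (by omega)
    subst this
    simp [PySem.Chars.count.go]
  | succ fuel ih =>
    cases l with
    | nil => simp [PySem.Chars.count.go]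
    | cons c t =>
      simp only [PySem.Chars.count.go]
      by_cases hc : c = m
      · subst hc
        have hpre : List.isPrefixOf [c] (c :: t) = true := by simp [List.isPrefixOf]
        rw [if_pos hpre]
        simp only [List.length_cons] at h
        rw [ih _ _ (by simpa using Nat.le_of_succ_le_succ h)]
        simp
        omega
      · have hpre : List.isPrefixOf [m] (c :: t) = false := by
          simp [List.isPrefixOf]
          exact fun he => hc he.symm
        rw [if_neg (by simp [hpre])]
        simp only [List.length_cons] at h
        rw [ih _ _ (by omega)]
        simp [hc]

lemma count_singleton (w : List Char) (m : Char) :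
    PySem.Chars.count w [m] = w.count m := by
  unfold PySem.Chars.count
  simp only [List.isEmpty_cons, if_false, Bool.false_eq_true]
  simpa using countGo_singleton m w.length w 0 le_rfl

-- A's per-word loop and B's min/count agree on every word (both give 0 on the empty word).
lemma calculateValue_eq_wordValue (w : List Char) : calculateValue w = wordValue w := by
  cases w with
  | nil => rfl
  | cons c r =>
    unfold calculateValue wordValue
    rw [PySem.List.min?_id_cons]
    simp only [count_singleton]
    simp only [List.foldl_cons]
    rw [calcFold_some]
    have hle : r.foldl min c ≤ c := (PySem.List.foldl_min_le r c).1
    by_cases h : r.foldl min c < c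
    · rw [if_pos h, List.count_cons]
      simp [Ne.symm (ne_of_lt h)]
    · have heq : r.foldl min c = c := le_antisymm hle (not_lt.mp h)
      rw [if_neg h, heq, List.count_cons_self]
      push_cast; ring

def pLt (b : Int) : Int → Bool := fun a => decide (a < b)

lemma length_takeWhile_add_dropWhile (xs : List Int) (p : Int → Bool) :
    (xs.takeWhile p).length + (xs.dropWhile p).length = xs.length := by
  conv_rhs => rw [← List.takeWhile_append_dropWhile (p := p) (l := xs)]
  exact (List.length_append).symm

-- In a nondecreasing list, the elements below b are exactly the (·<b)-prefix.
lemma getElem_lt_iff (xs : List Int) (b : Int) (hs : xs.Pairwise (· ≤ ·))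
    (j : Nat) (hj : j < xs.length) :
    xs[j] < b ↔ j < (xs.takeWhile (pLt b)).length := by
  have hsplit : xs.takeWhile (pLt b) ++ xs.dropWhile (pLt b) = xs :=
    List.takeWhile_append_dropWhile
  have hlen := length_takeWhile_add_dropWhile xs (pLt b)
  constructor
  · intro hlt
    by_contra hge
    push Not at hge
    have hjd : j - (xs.takeWhile (pLt b)).length < (xs.dropWhile (pLt b)).length := by omega
    have hdne : xs.dropWhile (pLt b) ≠ [] := by
      intro he
      rw [he] at hlen hjd
      simp at hjd
    have hhead : pLt b ((xs.dropWhile (pLt b)).head hdne) = false :=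
      List.head_dropWhile_not (pLt b) hdne
    have h0 : (xs.dropWhile (pLt b)).head hdne = (xs.dropWhile (pLt b))[0]'(by omega) :=
      List.head_eq_getElem hdne
    have hxj : xs[j] = (xs.dropWhile (pLt b))[j - (xs.takeWhile (pLt b)).length] := by
      have h1 : xs[j] = (xs.takeWhile (pLt b) ++ xs.dropWhile (pLt b))[j]'(by rw [hsplit]; exact hj) :=
        List.getElem_of_eq hsplit.symm hj
      rw [h1, List.getElem_append_right hge]
    have hpd : (xs.dropWhile (pLt b)).Pairwise (· ≤ ·) :=
      hs.sublist (List.dropWhile_sublist (pLt b))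
    have hle0 : (xs.dropWhile (pLt b))[0]'(by omega) ≤
        (xs.dropWhile (pLt b))[j - (xs.takeWhile (pLt b)).length] := by
      rcases Nat.eq_zero_or_pos (j - (xs.takeWhile (pLt b)).length) with h | h
      · exact le_of_eq (getElem_congr rfl h.symm (by omega))
      · exact (List.pairwise_iff_getElem.mp hpd) 0 _ (by omega) hjd h
    have hfail : ¬ ((xs.dropWhile (pLt b))[0]'(by omega) < b) := by
      rw [← h0]
      simpa [pLt] using hhead
    rw [hxj] at hlt
    omega
  · intro hlt
    have hxj : xs[j] = (xs.takeWhile (pLt b))[j] := by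
      have h1 : xs[j] = (xs.takeWhile (pLt b) ++ xs.dropWhile (pLt b))[j]'(by rw [hsplit]; exact hj) :=
        List.getElem_of_eq hsplit.symm hj
      rw [h1, List.getElem_append_left hlt]
    have : pLt b ((xs.takeWhile (pLt b))[j]) = true :=
      List.mem_takeWhile_imp (List.getElem_mem hlt)
    rw [hxj]
    simpa [pLt] using this

-- In a nondecreasing list, counting (·<b) is measuring the (·<b)-prefix.
lemma countP_eq_takeWhile_length (xs : List Int) (b : Int) (hs : xs.Pairwise (· ≤ ·)) :
    xs.countP (pLt b) = (xs.takeWhile (pLt b)).length := by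
  have hsplit : xs.takeWhile (pLt b) ++ xs.dropWhile (pLt b) = xs :=
    List.takeWhile_append_dropWhile
  have hlen := length_takeWhile_add_dropWhile xs (pLt b)
  conv_lhs => rw [← hsplit]
  rw [List.countP_append]
  have h1 : (xs.takeWhile (pLt b)).countP (pLt b) = (xs.takeWhile (pLt b)).length :=
    List.countP_eq_length.mpr (fun a ha => List.mem_takeWhile_imp ha)
  have h2 : (xs.dropWhile (pLt b)).countP (pLt b) = 0 := by
    rw [List.countP_eq_zero]
    intro a ha
    obtain ⟨i, hi, rfl⟩ := List.getElem_of_mem ha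
    have hj : (xs.takeWhile (pLt b)).length + i < xs.length := by omega
    have hxj : xs[(xs.takeWhile (pLt b)).length + i] = (xs.dropWhile (pLt b))[i] := by
      have hh : xs[(xs.takeWhile (pLt b)).length + i] =
          (xs.takeWhile (pLt b) ++ xs.dropWhile (pLt b))[(xs.takeWhile (pLt b)).length + i]'(by rw [hsplit]; exact hj) :=
        List.getElem_of_eq hsplit.symm hj
      rw [hh, List.getElem_append_right (by omega)]
      exact getElem_congr rfl (by omega) (by omega)
    have hiff := getElem_lt_iff xs b hs _ hj
    rw [hxj] at hiff
    simp only [pLt, decide_eq_true_eq]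
    intro hcon
    have := hiff.mp hcon
    omega
  omega

-- B's binary search returns the length of the (·<b)-prefix of a nondecreasing list.
lemma bisectLeftLoop_eq (xs : List Int) (b : Int) (hs : xs.Pairwise (· ≤ ·))
    (lo hi : Nat) (h1 : lo ≤ (xs.takeWhile (pLt b)).length)
    (h2 : (xs.takeWhile (pLt b)).length ≤ hi) (h3 : hi ≤ xs.length) :
    bisectLeftLoop xs b lo hi = (xs.takeWhile (pLt b)).length := by
  fun_induction bisectLeftLoop xs b lo hi with
  | case1 lo hi hlt mid hmid ih =>
    have hmlen : mid < xs.length := by omega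
    have := (getElem_lt_iff xs b hs mid hmlen).mp
      (by rwa [List.getD_eq_getElem xs 0 hmlen] at hmid)
    exact ih (by omega) h2 h3
  | case2 lo hi hlt mid hmid ih =>
    have hmlen : mid < xs.length := by omega
    rw [List.getD_eq_getElem xs 0 hmlen] at hmid
    have : ¬ mid < (xs.takeWhile (pLt b)).length := by
      intro hc
      exact hmid ((getElem_lt_iff xs b hs mid hmlen).mpr hc)
    exact ih h1 (by omega) (by omega)
  | case3 lo hi hlt => omega

lemma solution_eq_alt (A B : String) : solution A B = solution_alt A B := by
  unfold solution solution_alt calculateString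
  rw [PySem.List.foldl_append_singleton_eq_map, PySem.List.foldl_append_singleton_eq_map,
      PySem.List.foldl_append_singleton_eq_map]
  simp only [List.nil_append, List.map_map]
  have hfun : calculateValue = wordValue := funext calculateValue_eq_wordValue
  rw [hfun]
  apply List.map_congr_left
  intro w _
  simp only [Function.comp]
  set vA := (PySem.Chars.split₀ A.toList).map wordValue with hvA
  set b := wordValue w with hb
  set sA := PySem.List.sorted vA (fun v => v) false with hsA
  have hperm : sA.Perm vA := PySem.List.sorted_perm vA (fun v => v) false
  have hpair : sA.Pairwise (· ≤ ·) := PySem.List.sorted_pairwise vA (fun v => v)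
  rw [PySem.List.foldl_ite_add_one]
  have hc1 : vA.countP (pLt b) = sA.countP (pLt b) := (hperm.countP_eq (pLt b)).symm
  have hc2 : sA.countP (pLt b) = (sA.takeWhile (pLt b)).length :=
    countP_eq_takeWhile_length sA b hpair
  have hc3 : bisectLeftLoop sA b 0 sA.length = (sA.takeWhile (pLt b)).length :=
    bisectLeftLoop_eq sA b hpair 0 sA.length (Nat.zero_le _)
      ((List.takeWhile_sublist (pLt b)).length_le) le_rfl
  have : vA.countP (fun a => decide (a < b)) = bisectLeftLoop sA b 0 sA.length := by
    rw [hc3, ← hc2, ← hc1]; rfl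
  rw [this]
  ring

-- ===== VERDICT =====
theorem solution_spec : Claim_equal_solution := by
  intro A B _
  unfold Spec_solution
  exact solution_eq_alt A B
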